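-- pv_equiv track=rewrite | github.com/Sarath-Chelluri/DSA | countspecific_num.py | count_specific_num
-- ===== SOURCE A (Python) =====
-- def count_specific_num(x, y):
--     count = 0
--     if x > y:
--         return -1
--     lis = [2, 3, 5, 6, 7, 8, 0]
--     for i in range(x, y):
--         i = str(i)
--         if (
--             "2" in i
--             or "3" in i
--             or "5" in i
--             or "6" in i
--             or "7" in i
--             or "8" in i
--             or "0" in i
--         ):
--             count += 1
--     return 100 - count
-- ===== SOURCE B (Python) =====
-- def _good(n):
--     # n >= 1: True iff every decimal digit of n is in {1, 4, 9}
--     while n: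
--         if n % 10 not in (1, 4, 9):
--             return False
--         n //= 10
--     return True
--
--
-- def _C(n):
--     # number of k with 1 <= k <= n whose digits are all in {1, 4, 9}
--     if n <= 0:
--         return 0
--     q, r = divmod(n, 10)
--     if q == 0:
--         return sum(1 for d in (1, 4, 9) if d <= n)
--     return 3 * (_C(q - 1) + 1) + (sum(1 for d in (1, 4, 9) if d <= r) if _good(q) else 0)
--
--
-- def count_specific_num(x, y):
--     if x > y:
--         return -1
--     # good numbers in [x, y): str(i) contains no digit outside {1,4,9}
--     if x >= 0:
--         good = _C(y - 1) - _C(x - 1)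
--     elif y <= 0:
--         good = _C(-x) - _C(-y)
--     else:
--         good = _C(-x) + _C(y - 1)
--     return 100 - ((y - x) - good)
-- ===== Notes on version B (the rewrite author's own statement) =====
-- stated objective: faster
-- what changed: Instead of iterating over every integer in [x,y) and scanning its decimal string for forbidden digits, B counts the complement (numbers whose digits are all in {1,4,9}) with a digit-recursive counting function evaluated at the range bounds (mirroring for negatives) and returns 100 - ((y-x) - good).
import Mathlib
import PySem

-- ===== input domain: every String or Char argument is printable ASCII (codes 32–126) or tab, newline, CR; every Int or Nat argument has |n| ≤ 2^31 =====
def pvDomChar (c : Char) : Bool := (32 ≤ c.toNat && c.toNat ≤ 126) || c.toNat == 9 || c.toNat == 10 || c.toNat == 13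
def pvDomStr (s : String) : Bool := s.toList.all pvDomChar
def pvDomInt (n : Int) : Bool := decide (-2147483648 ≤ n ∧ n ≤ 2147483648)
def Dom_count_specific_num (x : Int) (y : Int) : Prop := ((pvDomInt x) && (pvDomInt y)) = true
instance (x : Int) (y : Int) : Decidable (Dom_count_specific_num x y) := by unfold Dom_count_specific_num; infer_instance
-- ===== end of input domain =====

-- B replaces A's per-number scan of [x,y) by a digit-recursive count of the numbers whose
-- digits all lie in {1,4,9}, evaluated only at the range bounds (objective: faster).

-- ===== PORT A =====
def count_specific_num (x : Int) (y : Int) : Int :=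
  let count : Int := 0
  if x > y then -1
  else
    let _lis : List Int := [2, 3, 5, 6, 7, 8, 0]
    let count := (PySem.List.pyRange x y 1).foldl (fun count i =>
      let i := PySem.Int.toStr i
      if PySem.Str.isIn "2" i || PySem.Str.isIn "3" i || PySem.Str.isIn "5" i ||
         PySem.Str.isIn "6" i || PySem.Str.isIn "7" i || PySem.Str.isIn "8" i ||
         PySem.Str.isIn "0" i then count + 1 else count) count
    100 - count

-- ===== PORT B =====
-- helpers of Source B; the extra Nat argument of pvGoodF/pvCF is fuel (a totality device only:
-- fuel n suffices since the argument strictly decreases, see pvGoodF_irrel/pvCF_irrel below)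
def pvIsS (d : Nat) : Bool := d == 1 || d == 4 || d == 9

-- Source B _good: all decimal digits in {1,4,9}
def pvGoodF : Nat → Nat → Bool
  | 0, _ => true
  | f + 1, n => if n = 0 then true else pvIsS (n % 10) && pvGoodF f (n / 10)

def pvGood (n : Nat) : Bool := pvGoodF n n

-- Source B: sum(1 for d in (1,4,9) if d <= r)
def pvSAtMost (r : Nat) : Nat := (([1, 4, 9] : List Nat).filter (fun d => d ≤ r)).length

-- Source B _C: number of k with 1 ≤ k ≤ n whose digits are all in {1,4,9}
def pvCF : Nat → Nat → Nat
  | 0, _ => 0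
  | f + 1, n =>
    if n = 0 then 0
    else
      let q := n / 10
      let r := n % 10
      if q = 0 then pvSAtMost n
      else 3 * (pvCF f (q - 1) + 1) + (if pvGood q then pvSAtMost r else 0)

def pvCnat (n : Nat) : Nat := pvCF n n

def pvC (n : Int) : Int := if n ≤ 0 then 0 else (pvCnat n.toNat : Int)

def count_specific_num_alt (x : Int) (y : Int) : Int :=
  if x > y then -1
  else
    let good : Int :=
      if x ≥ 0 then pvC (y - 1) - pvC (x - 1)
      else if y ≤ 0 then pvC (-x) - pvC (-y)
      else pvC (-x) + pvC (y - 1)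
    100 - ((y - x) - good)

-- ===== PRECONDITION & SPEC =====
def Spec_count_specific_num (x : Int) (y : Int) (out : Int) : Prop := out = count_specific_num_alt x y
instance (x : Int) (y : Int) (out : Int) : Decidable (Spec_count_specific_num x y out) := by unfold Spec_count_specific_num; infer_instance

-- ===== CLAIM (what is proved, stated in full; the proofs are below) =====
def Claim_equal_count_specific_num : Prop := ∀ (x : Int) (y : Int), Dom_count_specific_num x y → Spec_count_specific_num x y (count_specific_num x y)

-- ===== LEMMAS AND PROOFS =====

-- the "good" test on an Int as A sees it: nonzero and all digits of |i| in {1,4,9}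
def pvGoodI (i : Int) : Bool := !(i == 0) && pvGood i.natAbs

-- B's bound expression, named for the proofs
def pvGE (x y : Int) : Int :=
  if x ≥ 0 then pvC (y - 1) - pvC (x - 1)
  else if y ≤ 0 then pvC (-x) - pvC (-y)
  else pvC (-x) + pvC (y - 1)

-- decimal digit characters of n, most significant first (= Nat.toDigits 10 n, proved below)
def pvDigs (n : Nat) : List Char :=
  if h : n < 10 then [Nat.digitChar n]
  else pvDigs (n / 10) ++ [Nat.digitChar (n % 10)]
termination_by n
decreasing_by exact Nat.div_lt_self (by omega) (by omega)

def pvForb (cs : List Char) : Prop :=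
  '2' ∈ cs ∨ '3' ∈ cs ∨ '5' ∈ cs ∨ '6' ∈ cs ∨ '7' ∈ cs ∨ '8' ∈ cs ∨ '0' ∈ cs

lemma pvGoodF_irrel : ∀ (n f f' : Nat), n ≤ f → n ≤ f' → pvGoodF f n = pvGoodF f' n := by
  intro n
  induction n using Nat.strong_induction_on with
  | _ n ih =>
    intro f f' hf hf'
    by_cases hn : n = 0
    · subst hn; cases f <;> cases f' <;> simp [pvGoodF]
    · have hd : n / 10 < n := Nat.div_lt_self (by omega) (by omega)
      obtain ⟨g, rfl⟩ : ∃ g, f = g + 1 := ⟨f - 1, by omega⟩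
      obtain ⟨g', rfl⟩ : ∃ g', f' = g' + 1 := ⟨f' - 1, by omega⟩
      simp only [pvGoodF, if_neg hn]
      rw [ih (n / 10) hd g g' (by omega) (by omega)]

lemma pvGood_eq (n : Nat) :
    pvGood n = if n = 0 then true else pvIsS (n % 10) && pvGood (n / 10) := by
  by_cases hn : n = 0
  · subst hn; simp [pvGood, pvGoodF]
  · obtain ⟨m, rfl⟩ : ∃ m, n = m + 1 := ⟨n - 1, by omega⟩
    have hd : (m + 1) / 10 < m + 1 := Nat.div_lt_self (by omega) (by omega)
    simp only [pvGood, pvGoodF, if_neg hn]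
    rw [pvGoodF_irrel ((m + 1) / 10) m ((m + 1) / 10) (by omega) (by omega)]

lemma pvCF_irrel : ∀ (n f f' : Nat), n ≤ f → n ≤ f' → pvCF f n = pvCF f' n := by
  intro n
  induction n using Nat.strong_induction_on with
  | _ n ih =>
    intro f f' hf hf'
    by_cases hn : n = 0
    · subst hn; cases f <;> cases f' <;> simp [pvCF]
    · have hd : n / 10 < n := Nat.div_lt_self (by omega) (by omega)
      obtain ⟨g, rfl⟩ : ∃ g, f = g + 1 := ⟨f - 1, by omega⟩
      obtain ⟨g', rfl⟩ : ∃ g', f' = g' + 1 := ⟨f' - 1, by omega⟩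
      simp only [pvCF, if_neg hn]
      by_cases hq : n / 10 = 0
      · simp [hq]
      · simp only [hq, if_neg hq]
        rw [ih (n / 10 - 1) (by omega) g g' (by omega) (by omega)]

lemma pvCnat_eq (n : Nat) :
    pvCnat n = if n = 0 then 0
      else if n / 10 = 0 then pvSAtMost n
      else 3 * (pvCnat (n / 10 - 1) + 1) + (if pvGood (n / 10) then pvSAtMost (n % 10) else 0) := by
  by_cases hn : n = 0
  · subst hn; simp [pvCnat, pvCF]
  · obtain ⟨m, rfl⟩ : ∃ m, n = m + 1 := ⟨n - 1, by omega⟩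
    have hd : (m + 1) / 10 < m + 1 := Nat.div_lt_self (by omega) (by omega)
    simp only [pvCnat, pvCF, if_neg hn]
    by_cases hq : (m + 1) / 10 = 0
    · simp [hq]
    · simp only [hq, if_neg hq]
      rw [pvCF_irrel ((m + 1) / 10 - 1) m ((m + 1) / 10 - 1) (by omega) (by omega)]

lemma pv_sAtMost_step : ∀ r : Nat, 1 ≤ r → r ≤ 9 →
    pvSAtMost r = pvSAtMost (r - 1) + (if pvIsS r then 1 else 0) := by
  intro r h1 h2; interval_cases r <;> decide

-- C(n+1) = C(n) + [n+1 is good]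
lemma pvCnat_step : ∀ n : Nat, pvCnat (n + 1) = pvCnat n + (if pvGood (n + 1) then 1 else 0) := by
  intro n
  induction n using Nat.strong_induction_on with
  | _ n ih =>
    by_cases h9 : n ≤ 8
    · interval_cases n <;> decide
    · have hq1 : 1 ≤ (n + 1) / 10 := by omega
      by_cases hr : (n + 1) % 10 = 0
      · -- n+1 = 10q, n = 10(q-1)+9
        have hn10 : n / 10 = (n + 1) / 10 - 1 := by omega
        have hn9 : n % 10 = 9 := by omega
        rw [pvCnat_eq (n + 1), pvCnat_eq n, pvGood_eq (n + 1)]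
        rw [hr, hn10, hn9]
        have hs0 : pvSAtMost 0 = 0 := by decide
        have hs9 : pvSAtMost 9 = 3 := by decide
        have hiss0 : pvIsS 0 = false := by decide
        simp only [hs0, hs9, hiss0, Bool.false_and, if_false, ite_self, if_neg (by omega : ¬ n + 1 = 0), if_neg (by omega : ¬ (n + 1) / 10 = 0), if_neg (by omega : ¬ n = 0)]
        by_cases hqq : (n + 1) / 10 = 1
        · have : n = 9 := by omega
          subst this; decide
        · have hne : ¬ (n + 1) / 10 - 1 = 0 := by omega
          simp only [if_neg hne]
          have hih := ih ((n + 1) / 10 - 2) (by omega)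
          have harith : (n + 1) / 10 - 2 + 1 = (n + 1) / 10 - 1 := by omega
          rw [harith] at hih
          have h21 : (n + 1) / 10 - 1 - 1 = (n + 1) / 10 - 2 := by omega
          rw [h21, hih]
          cases hg : pvGood ((n + 1) / 10 - 1) <;> simp <;> omega
      · -- n+1 = 10q + r, 1 ≤ r ≤ 9; n = 10q + (r-1)
        have hn10 : n / 10 = (n + 1) / 10 := by omega
        have hn9 : n % 10 = (n + 1) % 10 - 1 := by omega
        rw [pvCnat_eq (n + 1), pvCnat_eq n, pvGood_eq (n + 1)]
        rw [hn10, hn9]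
        simp only [if_neg (by omega : ¬ n + 1 = 0), if_neg (by omega : ¬ (n + 1) / 10 = 0), if_neg (by omega : ¬ n = 0)]
        have hstep := pv_sAtMost_step ((n + 1) % 10) (by omega) (by omega)
        rw [hstep]
        cases hg : pvGood ((n + 1) / 10) <;> cases hs : pvIsS ((n + 1) % 10) <;> simp <;> omega

-- pvC step on Int
lemma pvC_nonpos (n : Int) (h : n ≤ 0) : pvC n = 0 := by simp [pvC, h]

lemma pvC_step (n : Int) (h : 1 ≤ n) :
    pvC n = pvC (n - 1) + (if pvGood n.toNat then 1 else 0) := by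
  have h1 : n.toNat = (n - 1).toNat + 1 := by omega
  by_cases h2 : n = 1
  · subst h2; simp [pvC]
    decide
  · have h3 : ¬ n ≤ 0 := by omega
    have h4 : ¬ n - 1 ≤ 0 := by omega
    simp only [pvC, if_neg h3, if_neg h4]
    rw [h1, pvCnat_step ((n - 1).toNat)]
    push_cast
    split <;> simp

-- digits of Nat.toDigits 10 are pvDigs
lemma pv_toDigitsCore_eq : ∀ (f n : Nat) (ds : List Char), 0 < f → n < 10 ^ f →
    Nat.toDigitsCore 10 f n ds = pvDigs n ++ ds := by
  intro f
  induction f with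
  | zero => intro n ds h; omega
  | succ f ih =>
    intro n ds _ hlt
    rw [Nat.toDigitsCore]
    by_cases hq : n / 10 = 0
    · have hn : n < 10 := by omega
      simp only [hq, if_pos rfl]
      rw [pvDigs, dif_pos hn, Nat.mod_eq_of_lt hn]
      simp
    · have hn : ¬ n < 10 := by omega
      simp only [if_neg hq]
      have hf : 0 < f := by
        by_contra hc
        have : f = 0 := by omega
        subst this
        simp at hlt
        omega
      have hdiv : n / 10 < 10 ^ f := by
        rw [Nat.div_lt_iff_lt_mul (by omega)]
        calc n < 10 ^ (f + 1) := hlt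
        _ = 10 ^ f * 10 := by ring
      rw [ih (n / 10) (Nat.digitChar (n % 10) :: ds) hf hdiv]
      conv_rhs => rw [pvDigs]
      rw [dif_neg hn]
      simp

lemma pv_toDigits_eq (n : Nat) : Nat.toDigits 10 n = pvDigs n := by
  have h1 : n < 10 ^ (n + 1) := by
    calc n < 2 ^ n := Nat.lt_two_pow_self
    _ ≤ 10 ^ n := Nat.pow_le_pow_left (by omega) n
    _ ≤ 10 ^ (n + 1) := Nat.pow_le_pow_right (by omega) (by omega)
  have := pv_toDigitsCore_eq (n + 1) n [] (by omega) h1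
  simpa [Nat.toDigits] using this

lemma pvForb_append (a b : List Char) : pvForb (a ++ b) ↔ pvForb a ∨ pvForb b := by
  simp only [pvForb, List.mem_append]
  tauto

lemma pvForb_single (r : Nat) (h : r < 10) :
    pvForb [Nat.digitChar r] ↔ pvIsS r = false := by
  unfold pvForb
  interval_cases r <;> decide

lemma pvForb_digs : ∀ n : Nat, pvForb (pvDigs n) ↔ (n = 0 ∨ pvGood n = false) := by
  intro n
  induction n using Nat.strong_induction_on with
  | _ n ih =>
    by_cases hn : n < 10
    · rw [pvDigs, dif_pos hn]
      rw [pvForb_single n hn]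
      interval_cases n <;> decide
    · have hd : n / 10 < n := Nat.div_lt_self (by omega) (by omega)
      have hq1 : 1 ≤ n / 10 := by omega
      rw [pvDigs, dif_neg hn, pvForb_append, pvForb_single _ (by omega),
        ih (n / 10) hd, pvGood_eq n]
      have h10 : ¬ n / 10 = 0 := by omega
      have hne : ¬ n = 0 := by omega
      simp only [h10, hne, false_or]
      cases hg : pvGood (n / 10) <;> cases hs : pvIsS (n % 10) <;> simp

lemma pv_singleton_infix {α : Type} (a : α) (l : List α) : [a] <:+: l ↔ a ∈ l := by
  constructor
  · intro h
    exact h.subset (List.mem_singleton_self a)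
  · intro h
    obtain ⟨s, t, rfl⟩ := List.append_of_mem h
    exact ⟨s, t, by simp⟩

lemma pv_isIn_single (c : Char) (sub : String) (s : String) (hsub : sub.toList = [c]) :
    PySem.Str.isIn sub s = true ↔ c ∈ s.toList := by
  rw [PySem.Str.isIn_iff_infix, hsub]
  exact pv_singleton_infix c s.toList

lemma pvForb_toChars (i : Int) :
    pvForb (PySem.Int.toChars i) ↔ (i = 0 ∨ pvGood i.natAbs = false) := by
  unfold PySem.Int.toChars
  by_cases hi : i < 0
  · rw [if_pos hi]
    have hmem : pvForb ('-' :: Nat.toDigits 10 i.natAbs) ↔ pvForb (Nat.toDigits 10 i.natAbs) := by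
      simp only [pvForb, List.mem_cons]
      simp
    rw [hmem, pv_toDigits_eq, pvForb_digs]
    have : ¬ i.natAbs = 0 := by omega
    have : ¬ i = 0 := by omega
    simp [*]
  · rw [if_neg hi]
    have hnn : i.toNat = i.natAbs := by omega
    rw [hnn, pv_toDigits_eq, pvForb_digs]
    have : i.natAbs = 0 ↔ i = 0 := by omega
    rw [this]

-- A's string test = not good
lemma pv_bad_eq (j : Int) :
    (PySem.Str.isIn "2" (PySem.Int.toStr j) || PySem.Str.isIn "3" (PySem.Int.toStr j) ||
     PySem.Str.isIn "5" (PySem.Int.toStr j) || PySem.Str.isIn "6" (PySem.Int.toStr j) ||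
     PySem.Str.isIn "7" (PySem.Int.toStr j) || PySem.Str.isIn "8" (PySem.Int.toStr j) ||
     PySem.Str.isIn "0" (PySem.Int.toStr j)) = !(pvGoodI j) := by
  rw [Bool.eq_iff_iff]
  simp only [Bool.or_eq_true, Bool.not_eq_true']
  rw [pv_isIn_single '2' "2" _ rfl, pv_isIn_single '3' "3" _ rfl, pv_isIn_single '5' "5" _ rfl,
    pv_isIn_single '6' "6" _ rfl, pv_isIn_single '7' "7" _ rfl, pv_isIn_single '8' "8" _ rfl,
    pv_isIn_single '0' "0" _ rfl]
  rw [PySem.Int.toList_toStr]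
  have h1 : ('2' ∈ PySem.Int.toChars j ∨ '3' ∈ PySem.Int.toChars j ∨ '5' ∈ PySem.Int.toChars j ∨
      '6' ∈ PySem.Int.toChars j ∨ '7' ∈ PySem.Int.toChars j ∨ '8' ∈ PySem.Int.toChars j ∨
      '0' ∈ PySem.Int.toChars j) ↔ (j = 0 ∨ pvGood j.natAbs = false) := pvForb_toChars j
  have h2 : pvGoodI j = false ↔ (j = 0 ∨ pvGood j.natAbs = false) := by
    by_cases hj : j = 0 <;> simp [pvGoodI, hj]
  rw [h2]
  tauto

-- pvGE facts
lemma pvGE_self (x : Int) : pvGE x x = 0 := by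
  unfold pvGE
  split_ifs with h1 h2
  · ring
  · ring
  · exfalso; omega

lemma pvGE_step (x y : Int) (h : x < y) :
    pvGE x y = (if pvGoodI x then 1 else 0) + pvGE (x + 1) y := by
  unfold pvGE
  by_cases hx : x ≥ 0
  · have hx1 : x + 1 ≥ 0 := by omega
    simp only [if_pos hx, if_pos hx1]
    have hx0 : x + 1 - 1 = x := by ring
    rw [hx0]
    by_cases hx00 : x = 0
    · subst hx00
      rw [pvC_nonpos 0 (by omega), pvC_nonpos (0 - 1) (by omega)]
      simp [pvGoodI]
    · have h1 : (1 : Int) ≤ x := by omega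
      have hstep := pvC_step x h1
      have hnn : x.natAbs = x.toNat := by omega
      have hgi : pvGoodI x = pvGood x.toNat := by simp [pvGoodI, hx00, hnn]
      rw [hgi]
      cases hgd : pvGood x.toNat <;> rw [hgd] at hstep <;> simp at hstep ⊢ <;> omega
  · by_cases hy : y ≤ 0
    · simp only [if_neg hx, if_pos hy]
      by_cases hx1 : x + 1 ≥ 0
      · have hxm : x = -1 := by omega
        have hym : y = 0 := by omega
        subst hxm; subst hym
        norm_num
        have e1 : pvC 1 = 1 := by decide
        have e2 : pvC 0 = 0 := by decide
        have e3 : pvGoodI (-1) = true := by decide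
        have e4 : pvC (-1) = 0 := by decide
        simp [e1, e2, e3, e4]
        try omega
      · simp only [if_neg hx1, if_pos hy]
        have h1 : (1 : Int) ≤ -x := by omega
        have hstep := pvC_step (-x) h1
        have hpre : -x - 1 = -(x + 1) := by ring
        rw [hpre] at hstep
        have hnn : x.natAbs = (-x).toNat := by omega
        have hx0 : ¬ x = 0 := by omega
        have hgi : pvGoodI x = pvGood (-x).toNat := by simp [pvGoodI, hx0, hnn]
        rw [hgi]
        cases hgd : pvGood (-x).toNat <;> rw [hgd] at hstep <;> simp at hstep ⊢ <;> omega
    · simp only [if_neg hx, if_neg hy]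
      by_cases hx1 : x + 1 ≥ 0
      · have hxm : x = -1 := by omega
        subst hxm
        norm_num
        have e1 : pvC 1 = 1 := by decide
        have e2 : pvC 0 = 0 := by decide
        have e3 : pvGoodI (-1) = true := by decide
        have e4 : pvC (-1) = 0 := by decide
        simp [e1, e2, e3, e4]
        try omega
      · simp only [if_neg hx1, if_neg hy]
        have h1 : (1 : Int) ≤ -x := by omega
        have hstep := pvC_step (-x) h1
        have hpre : -x - 1 = -(x + 1) := by ring
        rw [hpre] at hstep
        have hnn : x.natAbs = (-x).toNat := by omega
        have hx0 : ¬ x = 0 := by omega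
        have hgi : pvGoodI x = pvGood (-x).toNat := by simp [pvGoodI, hx0, hnn]
        rw [hgi]
        cases hgd : pvGood (-x).toNat <;> rw [hgd] at hstep <;> simp at hstep ⊢ <;> omega

lemma pv_foldA : ∀ (k : Nat) (x y c : Int), (y - x).toNat = k → x ≤ y →
    ((PySem.List.pyRange x y 1).foldl (fun count i =>
      if PySem.Str.isIn "2" (PySem.Int.toStr i) || PySem.Str.isIn "3" (PySem.Int.toStr i) ||
         PySem.Str.isIn "5" (PySem.Int.toStr i) || PySem.Str.isIn "6" (PySem.Int.toStr i) ||
         PySem.Str.isIn "7" (PySem.Int.toStr i) || PySem.Str.isIn "8" (PySem.Int.toStr i) ||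
         PySem.Str.isIn "0" (PySem.Int.toStr i) then count + 1 else count) c)
    = c + (y - x) - pvGE x y := by
  intro k
  induction k with
  | zero =>
    intro x y c hk hxy
    have hyx : y = x := by omega
    subst hyx
    rw [PySem.List.pyRange_one_eq_nil (le_refl y)]
    simp [pvGE_self]
  | succ k ih =>
    intro x y c hk hxy
    have hlt : x < y := by omega
    rw [PySem.List.pyRange_one_cons hlt]
    simp only [List.foldl_cons]
    rw [ih (x + 1) y _ (by omega) (by omega)]
    rw [pvGE_step x y hlt]
    simp only [pv_bad_eq]
    cases hg : pvGoodI x <;> simp [hg] <;> omega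

-- ===== VERDICT (by name: the statement is the Claim_ definition above) =====
theorem count_specific_num_spec : Claim_equal_count_specific_num := by
  intro x y _
  unfold Spec_count_specific_num count_specific_num count_specific_num_alt
  by_cases hxy : x > y
  · simp [hxy]
  · simp only [if_neg hxy]
    rw [pv_foldA (y - x).toNat x y 0 rfl (by omega)]
    show 100 - (0 + (y - x) - pvGE x y) = 100 - (y - x - pvGE x y)
    ring
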